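-- pv_equiv track=rewrite | github.com/DevOpsVL1/pdf-form-filler | form_fillers/cif1_base.py | fill_date_boxes
-- ===== SOURCE A (Python) =====
-- def fill_date_boxes(text, start_x, start_y, box_width=15, box_spacing=2,
--                     separator_width=7, separator_char='-'):
--     """
--     Fill date boxes with format DD-MM-YYYY where separators use smaller boxes
--     Separator characters are not rendered (left empty) but spacing is preserved
--
--     Args:
--         text: Date string (e.g., "06-06-1976")
--         start_x: Starting X coordinate
--         start_y: Starting Y coordinate
--         box_width: Width of regular character boxes
--         box_spacing: Spacing between boxes
--         separator_width: Width of separator boxes (smaller)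
--         separator_char: Character to use as separator
--
--     Returns:
--         List of tuples (char, x_pos, y_pos) - separators return empty string ''
--     """
--     positions = []
--     current_x = start_x
--
--     for char in text:
--         x_pos = current_x
--         y_pos = start_y
--
--         # If it's a separator, add empty string (won't be rendered)
--         if char == separator_char:
--             positions.append(('', x_pos, y_pos))  # Empty string instead of separator
--             current_x += separator_width + box_spacing
--         else:
--             positions.append((char, x_pos, y_pos))
--             current_x += box_width + box_spacing
--
--     return positions
-- ===== SOURCE B (Python) =====
-- def fill_date_boxes(text, start_x, start_y, box_width=15, box_spacing=2,
--                     separator_width=7, separator_char='-'):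
--     # Pass 1: map each character to its rendered char and horizontal advance.
--     pairs = [('', separator_width + box_spacing) if c == separator_char
--              else (c, box_width + box_spacing) for c in text]
--     # Pass 2: prefix-sum the advances (x of each box is the sum BEFORE its advance).
--     xs = []
--     x = start_x
--     for _, inc in pairs:
--         xs.append(x)
--         x += inc
--     # Pass 3: zip rendered chars with positions.
--     return [(ch, xp, start_y) for (ch, _), xp in zip(pairs, xs)]
-- ===== Notes on version B (the rewrite author's own statement) =====
-- stated objective: alternative
-- what changed: Replaces A's single loop that interleaves emitting tuples and advancing the cursor with three separate passes: a map from chars to (rendered char, advance) pairs, a prefix-sum of the advances for the x positions, and a zip producing the tuples.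
import Mathlib
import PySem

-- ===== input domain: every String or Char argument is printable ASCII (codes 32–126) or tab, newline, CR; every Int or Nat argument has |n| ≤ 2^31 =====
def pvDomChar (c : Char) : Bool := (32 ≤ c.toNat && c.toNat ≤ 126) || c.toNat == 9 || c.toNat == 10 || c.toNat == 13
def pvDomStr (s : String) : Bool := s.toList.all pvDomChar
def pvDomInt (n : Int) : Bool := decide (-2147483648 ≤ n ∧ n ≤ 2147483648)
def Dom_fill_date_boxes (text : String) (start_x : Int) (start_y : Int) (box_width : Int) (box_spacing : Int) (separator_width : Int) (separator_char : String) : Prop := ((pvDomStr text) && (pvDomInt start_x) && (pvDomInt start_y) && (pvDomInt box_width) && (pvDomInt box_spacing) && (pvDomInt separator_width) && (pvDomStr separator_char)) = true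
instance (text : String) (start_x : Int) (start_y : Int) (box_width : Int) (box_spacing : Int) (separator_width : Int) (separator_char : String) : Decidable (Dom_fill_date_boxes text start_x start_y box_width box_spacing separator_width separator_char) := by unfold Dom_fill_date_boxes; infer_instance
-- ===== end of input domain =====

-- B replaces A's single emit-and-advance loop by three passes (map to advances, prefix-sum, zip); same cost, different decomposition.

-- ===== PORT A =====
-- one loop over the characters keeping (positions so far, current_x)
def fill_date_boxes (text : String) (start_x : Int) (start_y : Int) (box_width : Int) (box_spacing : Int) (separator_width : Int) (separator_char : String) : List (String × Int × Int) :=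
  (text.toList.foldl
    (fun (st : List (String × Int × Int) × Int) char =>
      let x_pos := st.2
      let y_pos := start_y
      if String.mk [char] == separator_char then
        (st.1 ++ [("", x_pos, y_pos)], st.2 + (separator_width + box_spacing))
      else
        (st.1 ++ [(String.mk [char], x_pos, y_pos)], st.2 + (box_width + box_spacing)))
    ([], start_x)).1

-- ===== PORT B =====
-- pass 1: map to (rendered char, advance); pass 2: prefix-sum the advances; pass 3: zip
def fill_date_boxes_alt (text : String) (start_x : Int) (start_y : Int) (box_width : Int) (box_spacing : Int) (separator_width : Int) (separator_char : String) : List (String × Int × Int) :=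
  let pairs := text.toList.map
    (fun c => if String.mk [c] == separator_char
              then ("", separator_width + box_spacing)
              else (String.mk [c], box_width + box_spacing))
  let xs := (pairs.foldl
    (fun (st : List Int × Int) p => (st.1 ++ [st.2], st.2 + p.2))
    ([], start_x)).1
  (pairs.zip xs).map (fun pc => (pc.1.1, pc.2, start_y))

-- ===== PRECONDITION & SPEC =====
def Spec_fill_date_boxes (text : String) (start_x : Int) (start_y : Int) (box_width : Int) (box_spacing : Int) (separator_width : Int) (separator_char : String) (out : List (String × Int × Int)) : Prop := out = fill_date_boxes_alt text start_x start_y box_width box_spacing separator_width separator_char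
instance (text : String) (start_x : Int) (start_y : Int) (box_width : Int) (box_spacing : Int) (separator_width : Int) (separator_char : String) (out : List (String × Int × Int)) : Decidable (Spec_fill_date_boxes text start_x start_y box_width box_spacing separator_width separator_char out) := by unfold Spec_fill_date_boxes; infer_instance

-- ===== CLAIM (what is proved, stated in full; the proofs are below) =====
def Claim_equal_fill_date_boxes : Prop := ∀ (text : String) (start_x : Int) (start_y : Int) (box_width : Int) (box_spacing : Int) (separator_width : Int) (separator_char : String), Dom_fill_date_boxes text start_x start_y box_width box_spacing separator_width separator_char → Spec_fill_date_boxes text start_x start_y box_width box_spacing separator_width separator_char (fill_date_boxes text start_x start_y box_width box_spacing separator_width separator_char)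

-- ===== LEMMAS AND PROOFS =====

-- reference: the list both programs compute, by direct recursion on the characters
def pvRef (sep : String) (sy bw bs sw : Int) : List Char → Int → List (String × Int × Int)
  | [], _ => []
  | c :: cs, x =>
    if String.mk [c] == sep then
      ("", x, sy) :: pvRef sep sy bw bs sw cs (x + (sw + bs))
    else
      (String.mk [c], x, sy) :: pvRef sep sy bw bs sw cs (x + (bw + bs))

-- A's fold from any accumulator appends the reference list
theorem pvA_fold (sep : String) (sy bw bs sw : Int) (cs : List Char) :
    ∀ (acc : List (String × Int × Int)) (x : Int),
      (cs.foldl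
        (fun (st : List (String × Int × Int) × Int) char =>
          let x_pos := st.2
          let y_pos := sy
          if String.mk [char] == sep then
            (st.1 ++ [("", x_pos, y_pos)], st.2 + (sw + bs))
          else
            (st.1 ++ [(String.mk [char], x_pos, y_pos)], st.2 + (bw + bs)))
        (acc, x)).1 = acc ++ pvRef sep sy bw bs sw cs x := by
  induction cs with
  | nil => intro acc x; simp [pvRef]
  | cons c cs ih =>
    intro acc x
    by_cases h : String.mk [c] == sep
    · simp only [List.foldl_cons, h, if_true, ih, pvRef]
      simp
    · simp only [List.foldl_cons, h, if_false, ih, pvRef, Bool.false_eq_true]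
      simp

-- B's prefix-sum fold from any accumulator appends the x positions
def pvXs (l : List (String × Int)) (x : Int) : List Int :=
  match l with
  | [] => []
  | p :: ps => x :: pvXs ps (x + p.2)

theorem pvB_fold (l : List (String × Int)) :
    ∀ (acc : List Int) (x : Int),
      (l.foldl (fun (st : List Int × Int) p => (st.1 ++ [st.2], st.2 + p.2)) (acc, x)).1
        = acc ++ pvXs l x := by
  induction l with
  | nil => intro acc x; simp [pvXs]
  | cons p ps ih => intro acc x; simp [pvXs, List.foldl, ih]

-- B's zip of pairs with their positions equals the reference list
theorem pvB_zip (sep : String) (sy bw bs sw : Int) (cs : List Char) :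
    ∀ (x : Int),
      ((cs.map (fun c => if String.mk [c] == sep
                         then (("" : String), sw + bs)
                         else (String.mk [c], bw + bs))).zip
        (pvXs (cs.map (fun c => if String.mk [c] == sep
                         then (("" : String), sw + bs)
                         else (String.mk [c], bw + bs))) x)).map
        (fun pc => (pc.1.1, pc.2, sy))
      = pvRef sep sy bw bs sw cs x := by
  induction cs with
  | nil => intro x; simp [pvXs, pvRef]
  | cons c cs ih =>
    intro x
    by_cases h : String.mk [c] == sep
    · simp only [List.map, h, if_pos, pvXs, List.zip, List.zipWith, pvRef]
      exact congrArg _ (ih _)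
    · simp only [List.map, h, if_neg, pvXs, List.zip, List.zipWith, pvRef, Bool.false_eq_true,
        not_false_iff, if_false]
      exact congrArg _ (ih _)

-- ===== VERDICT (by name: the statement is the Claim_ definition above) =====
theorem fill_date_boxes_spec : Claim_equal_fill_date_boxes := by
  intro text sx sy bw bs sw sep _
  unfold Spec_fill_date_boxes fill_date_boxes fill_date_boxes_alt
  simp only [pvA_fold, pvB_fold, List.nil_append, pvB_zip]
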